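-- pv_equiv track=rewrite | github.com/pcunnin7/Python-Introduction-Assighnments | stringLooping.py | markDoubles
-- ===== SOURCE A (Python) =====
-- def markDoubles(within):
--     y = ""
--     marked = ""
--     for x in within:
--         if x == y:
--             y = x
--             x = "2" + x
--         else:
--             y = x
--         marked += x
--     '''
-- Annotate any repeated characters by placing a 2 between them
--    within - the string to mark
--  returns the marked string
--     '''
--     return marked
-- ===== SOURCE B (Python) =====
-- def markDoubles(within):
--     # Run-based: split into maximal runs of equal chars; each run of length L
--     # becomes the char with '2' inserted between copies ("2".join), then concatenate.
--     out = []
--     i = 0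
--     n = len(within)
--     while i < n:
--         j = i
--         while j < n and within[j] == within[i]:
--             j += 1
--         out.append("2".join(within[i] * (j - i)))
--         i = j
--     return "".join(out)
-- ===== Notes on version B (the rewrite author's own statement) =====
-- stated objective: alternative
-- what changed: Replaced the prev-character comparison with a string accumulator by a run-grouping scan: find each maximal run of equal characters and emit '2'.join of the run, concatenating the per-run pieces.
import Mathlib
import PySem

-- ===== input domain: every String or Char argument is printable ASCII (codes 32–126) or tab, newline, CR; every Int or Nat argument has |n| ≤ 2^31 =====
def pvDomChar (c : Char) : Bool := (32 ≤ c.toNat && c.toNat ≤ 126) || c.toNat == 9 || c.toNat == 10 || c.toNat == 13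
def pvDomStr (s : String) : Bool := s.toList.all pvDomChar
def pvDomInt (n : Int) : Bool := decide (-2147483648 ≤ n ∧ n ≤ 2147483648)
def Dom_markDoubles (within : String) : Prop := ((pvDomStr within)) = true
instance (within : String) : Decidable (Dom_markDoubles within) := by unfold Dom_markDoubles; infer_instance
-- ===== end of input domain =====

-- B replaces A's previous-character comparison/accumulator pass by a run-grouping scan
-- (maximal runs of equal characters, '2'-joined); same cost, alternative structure.

-- ===== PORT A =====
-- A: one pass keeping the previous character y (initially the empty string) and an accumulator.
def markDoubles (within : String) : String :=
  let st := within.toList.foldl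
    (fun (st : List Char × List Char) x =>
      if [x] = st.1 then ([x], st.2 ++ ['2', x]) else ([x], st.2 ++ [x]))
    ([], [])
  String.ofList st.2

-- ===== PORT B =====
-- "2".join of a nonempty list of copies: first copy, then '2' before each further copy.
def pvJoin2 : List Char → List Char
  | [] => []
  | c :: rest => c :: rest.flatMap (fun d => ['2', d])

-- the maximal runs of equal characters, front to back (Source B's outer/inner while loops)
def pvRuns (l : List Char) : List (Char × Nat) :=
  match l with
  | [] => []
  | x :: xs => (x, 1 + (xs.takeWhile (· == x)).length) :: pvRuns (xs.dropWhile (· == x))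
  termination_by l.length
  decreasing_by
    simp only [List.length_cons]
    have := List.length_dropWhile_le (· == x) xs
    omega

def markDoubles_alt (within : String) : String :=
  String.ofList (((pvRuns within.toList).map (fun p => pvJoin2 (List.replicate p.2 p.1))).flatten)

-- ===== PRECONDITION & SPEC =====
def Spec_markDoubles (within : String) (out : String) : Prop := out = markDoubles_alt within
instance (within : String) (out : String) : Decidable (Spec_markDoubles within out) := by unfold Spec_markDoubles; infer_instance

-- ===== CLAIM (what is proved, stated in full; the proofs are below) =====
def Claim_equal_markDoubles : Prop := ∀ (within : String), Dom_markDoubles within → Spec_markDoubles within (markDoubles within)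

-- ===== LEMMAS AND PROOFS =====

-- A's loop, phrased recursively: what remains to be emitted given previous char y.
def pvMarkFrom : List Char → List Char → List Char
  | _, [] => []
  | y, x :: xs => (if [x] = y then ['2', x] else [x]) ++ pvMarkFrom [x] xs

lemma pvFoldA_eq (l : List Char) : ∀ (y acc : List Char),
    (l.foldl (fun (st : List Char × List Char) x =>
      if [x] = st.1 then ([x], st.2 ++ ['2', x]) else ([x], st.2 ++ [x])) (y, acc)).2
    = acc ++ pvMarkFrom y l := by
  induction l with
  | nil => intro y acc; simp [pvMarkFrom]
  | cons x xs ih =>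
    intro y acc
    by_cases h : [x] = y <;> simp [pvMarkFrom, h, ih]

lemma pvMarkFrom_run (x : Char) : ∀ (xs : List Char),
    pvMarkFrom [x] xs
    = (xs.takeWhile (· == x)).flatMap (fun d => ['2', d])
      ++ pvMarkFrom [] (xs.dropWhile (· == x)) := by
  intro xs
  induction xs with
  | nil => simp [pvMarkFrom]
  | cons z r ih =>
    by_cases h : z = x
    · subst h
      simp [pvMarkFrom, ih]
    · have hb : (z == x) = false := by simp [h]
      have hne : ¬ ([z] = [x]) := by simp [h]
      simp [pvMarkFrom, hb, hne]

lemma pvTakeWhile_replicate (x : Char) (l : List Char) :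
    l.takeWhile (· == x) = List.replicate (l.takeWhile (· == x)).length x := by
  rw [List.eq_replicate_iff]
  refine ⟨rfl, fun b hb => ?_⟩
  have := List.mem_takeWhile_imp hb
  simpa using this

lemma pvMarkFrom_eq_alt : ∀ (n : Nat) (l : List Char), l.length ≤ n →
    pvMarkFrom [] l
    = ((pvRuns l).map (fun p => pvJoin2 (List.replicate p.2 p.1))).flatten := by
  intro n
  induction n with
  | zero =>
    intro l hl
    have : l = [] := List.length_eq_zero_iff.mp (Nat.le_zero.mp hl)
    subst this; simp [pvMarkFrom, pvRuns]
  | succ n ih =>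
    intro l hl
    cases l with
    | nil => simp [pvMarkFrom, pvRuns]
    | cons x xs =>
      have hd : (xs.dropWhile (· == x)).length ≤ n := by
        have := List.length_dropWhile_le (· == x) xs
        simp only [List.length_cons] at hl
        omega
      have hrep := pvTakeWhile_replicate x xs
      have h1 : pvMarkFrom [] (x :: xs) = [x] ++ pvMarkFrom [x] xs := by
        simp [pvMarkFrom]
      rw [h1, pvMarkFrom_run, ih _ hd]
      rw [pvRuns]
      simp only [List.map_cons, List.flatten_cons]
      rw [Nat.add_comm, List.replicate_succ, pvJoin2]
      conv_rhs => rw [← hrep]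
      simp

-- ===== VERDICT (by name: the statement is the Claim_ definition above) =====
theorem markDoubles_spec : Claim_equal_markDoubles := by
  intro within _
  unfold Spec_markDoubles markDoubles markDoubles_alt
  simp only
  rw [pvFoldA_eq, pvMarkFrom_eq_alt within.toList.length within.toList le_rfl]
  simp
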